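-- pv_equiv track=rewrite | github.com/Wizmann/ACM-ICPC | Codeforces/Codeforces Beta Round #65 (Div. 2)/C.py | solve
-- ===== SOURCE A (Python) =====
-- def solve(n, ns):
--     i = 1
--     st = set()
--     while i * i <= n:
--         if n % i == 0:
--             st.add(i)
--             st.add(n // i)
--         i += 1
--
--     for m in st:
--         if m < 3:
--             continue
--         u = n // m
--         for i in range(u):
--             flag = True
--             for j in range(m):
--                 p = i + j * u
--                 if ns[p] == 0:
--                     flag = False
--                     break
--             if flag:
--                 return True
--     return False
-- ===== SOURCE B (Python) =====
-- def solve(n, ns):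
--     zeros = [p for p in range(n) if ns[p] == 0]
--     d = 1
--     while d * d <= n:
--         if n % d == 0:
--             for u in (d, n // d):
--                 if n // u >= 3 and len({z % u for z in zeros}) < u:
--                     return True
--         d += 1
--     return False
-- ===== Notes on version B (the rewrite author's own statement) =====
-- stated objective: alternative
-- what changed: B collects the zero positions once and, for each divisor u of n with n//u >= 3, tests whether the residues of the zeros mod u cover [0,u) via one set, replacing A's triple nested scan over all start positions of every progression.
-- outside the precondition, e.g. on solve(2, []): A returns False, B raises IndexError
import Mathlib
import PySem

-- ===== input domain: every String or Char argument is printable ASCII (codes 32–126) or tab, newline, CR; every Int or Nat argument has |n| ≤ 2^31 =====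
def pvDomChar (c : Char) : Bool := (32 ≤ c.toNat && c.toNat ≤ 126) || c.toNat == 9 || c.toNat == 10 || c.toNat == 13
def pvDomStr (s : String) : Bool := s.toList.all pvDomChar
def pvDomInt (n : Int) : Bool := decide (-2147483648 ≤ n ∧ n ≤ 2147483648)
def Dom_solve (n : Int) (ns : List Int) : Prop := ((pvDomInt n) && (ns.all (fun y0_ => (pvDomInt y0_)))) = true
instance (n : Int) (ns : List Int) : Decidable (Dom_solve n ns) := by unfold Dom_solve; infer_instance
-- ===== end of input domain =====

-- B replaces A's triple nested scan by collecting the zero positions once and testing, per divisor u,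
-- whether the residues of the zeros mod u cover [0,u); equivalence of the RETURN values is proved on Pre_.

-- ===== PORT A =====
-- while i*i <= n: if n % i == 0: st.add(i); st.add(n//i); i += 1
def pvDivSet (n : Int) (i : Nat) (st : PySem.Set Int) : PySem.Set Int :=
  if h : (i : Int) * i ≤ n then
    pvDivSet n (i + 1)
      (if PySem.Int.mod n i = 0 then (st.add (i : Int)).add (PySem.Int.floordiv n i) else st)
  else st
termination_by n.toNat + 1 - i
decreasing_by
  have h2 : 2 * (i : Int) ≤ n + 1 := by nlinarith
  omega

-- the 'for m in st' loop returns True iff SOME m works: the result is order-independent, ported as List.any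
def solve (n : Int) (ns : List Int) : Bool :=
  let st := pvDivSet n 1 PySem.Set.empty
  st.any (fun m =>
    if m < 3 then false
    else
      let u := PySem.Int.floordiv n m
      (PySem.List.pyRange 0 u 1).any (fun i =>
        (PySem.List.pyRange 0 m 1).all (fun j =>
          PySem.List.pyGetD ns (i + j * u) 0 != 0)))

-- ===== PORT B =====
-- n // u >= 3 and len({z % u for z in zeros}) < u
def pvOk (n : Int) (zeros : List Int) (u : Int) : Bool :=
  decide (3 ≤ PySem.Int.floordiv n u) &&
  decide (((PySem.Set.ofList (zeros.map (fun z => PySem.Int.mod z u))).length : Int) < u)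

-- while d*d <= n: if n % d == 0: for u in (d, n//d): if ok(u): return True; d += 1
def pvAltLoop (n : Int) (zeros : List Int) (d : Nat) : Bool :=
  if h : (d : Int) * d ≤ n then
    if PySem.Int.mod n d = 0 ∧ (pvOk n zeros d ∨ pvOk n zeros (PySem.Int.floordiv n d))
    then true
    else pvAltLoop n zeros (d + 1)
  else false
termination_by n.toNat + 1 - d
decreasing_by
  have h2 : 2 * (d : Int) ≤ n + 1 := by nlinarith
  omega

def solve_alt (n : Int) (ns : List Int) : Bool :=
  let zeros := (PySem.List.pyRange 0 n 1).filter (fun p => PySem.List.pyGetD ns p 0 == 0)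
  pvAltLoop n zeros 1

-- ===== PRECONDITION & SPEC =====
-- Pre_ excludes len(ns) < n, where A (for most such inputs) and B (always, once n ≥ 1) raise IndexError;
-- on the few such inputs where A still returns (e.g. (2, [])), B raises, so they are excluded here.
def Pre_solve (n : Int) (ns : List Int) : Prop := n ≤ (ns.length : Int)
instance (n : Int) (ns : List Int) : Decidable (Pre_solve n ns) := by unfold Pre_solve; infer_instance
def pvWitness_solve : Int × List Int := (6, [1, 0, 1, 1, 0, 1])

def Spec_solve (n : Int) (ns : List Int) (out : Bool) : Prop := out = solve_alt n ns
instance (n : Int) (ns : List Int) (out : Bool) : Decidable (Spec_solve n ns out) := by unfold Spec_solve; infer_instance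

-- ===== CLAIM (what is proved, stated in full; the proofs are below) =====
def Claim_equal_solve : Prop := ∀ (n : Int) (ns : List Int), Dom_solve n ns → Pre_solve n ns → Spec_solve n ns (solve n ns)

-- helper predicates used only by the proofs
def pvZeros (n : Int) (ns : List Int) : List Int :=
  (PySem.List.pyRange 0 n 1).filter (fun p => PySem.List.pyGetD ns p 0 == 0)

def pvRes (n : Int) (ns : List Int) (u : Int) : List Int :=
  PySem.Set.ofList ((pvZeros n ns).map (fun z => PySem.Int.mod z u))

def pvGood (ns : List Int) (u m : Int) : Prop :=
  ∃ i, 0 ≤ i ∧ i < u ∧ ∀ j, 0 ≤ j → j < m → PySem.List.pyGetD ns (i + j * u) 0 ≠ 0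

theorem mem_pvDivSet (n : Int) (i : Nat) (st : PySem.Set Int) (m : Int) :
    m ∈ pvDivSet n i st ↔
      m ∈ st ∨ ∃ d : Nat, i ≤ d ∧ (d : Int) * d ≤ n ∧ PySem.Int.mod n d = 0 ∧
        (m = (d : Int) ∨ m = PySem.Int.floordiv n d) := by
  fun_induction pvDivSet n i st with
  | case1 i st h ih =>
    rw [dite_eq_ite] at ih
    rw [ih]
    constructor
    · rintro (hst | ⟨d, hd1, hd2, hd3, hd4⟩)
      · by_cases hc : PySem.Int.mod n i = 0
        · rw [if_pos hc] at hst
          rcases (PySem.Set.mem_add _ _ _).1 hst with hst' | hm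
          · rcases (PySem.Set.mem_add _ _ _).1 hst' with h2 | hm
            · exact Or.inl h2
            · exact Or.inr ⟨i, le_refl _, h, hc, Or.inl hm⟩
          · exact Or.inr ⟨i, le_refl _, h, hc, Or.inr hm⟩
        · rw [if_neg hc] at hst
          exact Or.inl hst
      · exact Or.inr ⟨d, by omega, hd2, hd3, hd4⟩
    · rintro (hst | ⟨d, hd1, hd2, hd3, hd4⟩)
      · left
        by_cases hc : PySem.Int.mod n i = 0
        · rw [if_pos hc]
          exact (PySem.Set.mem_add _ _ _).2 (Or.inl ((PySem.Set.mem_add _ _ _).2 (Or.inl hst)))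
        · rwa [if_neg hc]
      · by_cases hdi : d = i
        · subst hdi
          left
          rw [if_pos hd3]
          rcases hd4 with h4 | h4
          · exact (PySem.Set.mem_add _ _ _).2 (Or.inl ((PySem.Set.mem_add _ _ _).2 (Or.inr h4)))
          · exact (PySem.Set.mem_add _ _ _).2 (Or.inr h4)
        · exact Or.inr ⟨d, by omega, hd2, hd3, hd4⟩
  | case2 i st h =>
    constructor
    · exact Or.inl
    · rintro (hst | ⟨d, hd1, hd2, hd3, hd4⟩)
      · exact hst
      · exfalso
        have : (i : Int) ≤ (d : Int) := by exact_mod_cast hd1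
        nlinarith [Int.natCast_nonneg i, Int.natCast_nonneg d]

theorem pvAltLoop_eq_true (n : Int) (zeros : List Int) (i : Nat) :
    pvAltLoop n zeros i = true ↔
      ∃ d : Nat, i ≤ d ∧ (d : Int) * d ≤ n ∧ PySem.Int.mod n d = 0 ∧
        (pvOk n zeros d = true ∨ pvOk n zeros (PySem.Int.floordiv n d) = true) := by
  fun_induction pvAltLoop n zeros i with
  | case1 i h hc =>
    refine iff_of_true rfl ?_
    exact ⟨i, le_refl _, h, hc.1, hc.2⟩
  | case2 i h hc ih =>
    rw [ih]
    constructor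
    · rintro ⟨d, hd1, hd2, hd3, hd4⟩
      exact ⟨d, by omega, hd2, hd3, hd4⟩
    · rintro ⟨d, hd1, hd2, hd3, hd4⟩
      by_cases hdi : d = i
      · subst hdi
        exact absurd ⟨hd3, hd4⟩ hc
      · exact ⟨d, by omega, hd2, hd3, hd4⟩
  | case3 i h =>
    constructor
    · intro hfalse; exact absurd hfalse (by simp)
    intro hx
    obtain ⟨d, hd1, hd2, hd3, hd4⟩ := hx
    have : (i : Int) ≤ (d : Int) := by exact_mod_cast hd1
    nlinarith [Int.natCast_nonneg i, Int.natCast_nonneg d]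

theorem divisor_pair_iff (n m : Int) (hn : 1 ≤ n) (i : Nat) (hi : i = 1) :
    (∃ d : Nat, i ≤ d ∧ (d : Int) * d ≤ n ∧ PySem.Int.mod n d = 0 ∧
        (m = (d : Int) ∨ m = PySem.Int.floordiv n d)) ↔ (1 ≤ m ∧ m ∣ n) := by
  subst hi
  constructor
  · rintro ⟨d, hd1, hd2, hd3, hd4⟩
    have hd0 : (1 : Int) ≤ (d : Int) := by exact_mod_cast hd1
    have hdvd : (d : Int) ∣ n := (PySem.Int.mod_eq_zero_iff_dvd n d).1 hd3
    obtain ⟨k, hk⟩ := hdvd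
    have hfd : PySem.Int.floordiv n d = k := by
      rw [PySem.Int.floordiv_eq_ediv_of_pos (by omega), hk,
        Int.mul_ediv_cancel_left _ (by omega)]
    have hk1 : 1 ≤ k := by nlinarith
    rcases hd4 with h4 | h4
    · exact ⟨by omega, by rw [h4]; exact ⟨k, hk⟩⟩
    · rw [h4, hfd]
      exact ⟨hk1, ⟨d, by rw [hk]; ring⟩⟩
  · rintro ⟨hm1, k, hk⟩
    have hk1 : 1 ≤ k := by nlinarith
    by_cases hc : m * m ≤ n
    · refine ⟨m.toNat, by omega, ?_, ?_, Or.inl (by omega)⟩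
      · rw [Int.toNat_of_nonneg (by omega)]; exact hc
      · rw [Int.toNat_of_nonneg (by omega)]
        exact (PySem.Int.mod_eq_zero_iff_dvd n m).2 ⟨k, hk⟩
    · refine ⟨k.toNat, by omega, ?_, ?_, Or.inr ?_⟩
      · rw [Int.toNat_of_nonneg (by omega)]
        nlinarith
      · rw [Int.toNat_of_nonneg (by omega)]
        exact (PySem.Int.mod_eq_zero_iff_dvd n k).2 ⟨m, by rw [hk]; ring⟩
      · rw [Int.toNat_of_nonneg (by omega),
          PySem.Int.floordiv_eq_ediv_of_pos (by omega), hk, mul_comm,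
          Int.mul_ediv_cancel_left _ (by omega)]

theorem pvInner_iff (ns : List Int) (u m : Int) :
    ((PySem.List.pyRange 0 u 1).any (fun i =>
        (PySem.List.pyRange 0 m 1).all (fun j =>
          PySem.List.pyGetD ns (i + j * u) 0 != 0)) = true) ↔ pvGood ns u m := by
  simp only [pvGood, List.any_eq_true, List.all_eq_true, PySem.List.mem_pyRange_one,
    bne_iff_ne, ne_eq, and_imp]
  constructor
  · rintro ⟨i, ⟨h0, h1⟩, h2⟩
    exact ⟨i, h0, h1, fun j hj0 hj1 => h2 j hj0 hj1⟩
  · rintro ⟨i, h0, h1, h2⟩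
    exact ⟨i, ⟨h0, h1⟩, fun j hj0 hj1 => h2 j hj0 hj1⟩

theorem notMem_pvRes_iff (n : Int) (ns : List Int) (u m i : Int)
    (hu : 1 ≤ u) (_hm : 1 ≤ m) (hmu : m * u = n)
    (hi0 : 0 ≤ i) (hiu : i < u) :
    i ∉ pvRes n ns u ↔ ∀ j, 0 ≤ j → j < m → PySem.List.pyGetD ns (i + j * u) 0 ≠ 0 := by
  have hu0 : (0 : Int) < u := by omega
  constructor
  · intro hni j hj0 hjm heq
    apply hni
    unfold pvRes pvZeros
    rw [PySem.Set.mem_ofList]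
    refine List.mem_map.2 ⟨i + j * u, List.mem_filter.2 ⟨?_, ?_⟩, ?_⟩
    · refine (PySem.List.mem_pyRange_one).2 ⟨by nlinarith, by nlinarith⟩
    · simpa using heq
    · rw [PySem.Int.mod_eq_emod_of_pos hu0, Int.add_mul_emod_self_right i j u]
      exact Int.emod_eq_of_lt hi0 hiu
  · intro hall hmem
    unfold pvRes pvZeros at hmem
    rw [PySem.Set.mem_ofList] at hmem
    obtain ⟨z, hzmem, hzmod⟩ := List.mem_map.1 hmem
    obtain ⟨hzr, hz0⟩ := List.mem_filter.1 hzmem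
    obtain ⟨hz1, hz2⟩ := (PySem.List.mem_pyRange_one).1 hzr
    have hz0' : PySem.List.pyGetD ns z 0 = 0 := by simpa using hz0
    have hmod : z % u = i := by rwa [PySem.Int.mod_eq_emod_of_pos hu0] at hzmod
    have hde : u * (z / u) + z % u = z := Int.mul_ediv_add_emod z u
    have hzeq : z = i + (z / u) * u := by
      rw [hmod] at hde
      linarith [mul_comm u (z / u)]
    have hj0 : 0 ≤ z / u := Int.ediv_nonneg hz1 (le_of_lt hu0)
    have hjm : z / u < m := by
      rw [Int.ediv_lt_iff_lt_mul hu0]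
      nlinarith
    exact hall (z / u) hj0 hjm (hzeq ▸ hz0')

theorem pvRes_len_lt_iff (n : Int) (ns : List Int) (u : Int) (hu : 1 ≤ u) :
    (((pvRes n ns u).length : Int) < u) ↔ ∃ i, 0 ≤ i ∧ i < u ∧ i ∉ pvRes n ns u := by
  have hnd : (pvRes n ns u).Nodup := PySem.Set.nodup_ofList _
  have hbd : ∀ x ∈ pvRes n ns u, 0 ≤ x ∧ x < u := by
    intro x hx
    unfold pvRes at hx
    rw [PySem.Set.mem_ofList] at hx
    obtain ⟨z, _, hz⟩ := List.mem_map.1 hx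
    subst hz
    exact ⟨PySem.Int.mod_nonneg (a := z) (by omega), PySem.Int.mod_lt (a := z) (by omega)⟩
  have hcard : (pvRes n ns u).toFinset.card = (pvRes n ns u).length :=
    List.toFinset_card_of_nodup hnd
  have hsub : (pvRes n ns u).toFinset ⊆ Finset.Ico (0 : Int) u := by
    intro x hx
    exact Finset.mem_Ico.2 (hbd x (List.mem_toFinset.1 hx))
  have hIco : (Finset.Ico (0 : Int) u).card = u.toNat := by
    rw [Int.card_Ico]
    omega
  constructor
  · intro h
    have hlt : (pvRes n ns u).toFinset.card < (Finset.Ico (0 : Int) u).card := by omega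
    obtain ⟨i, hiI, hiS⟩ := Finset.exists_mem_notMem_of_card_lt_card hlt
    obtain ⟨h0, h1⟩ := Finset.mem_Ico.1 hiI
    exact ⟨i, h0, h1, fun hmem => hiS (List.mem_toFinset.2 hmem)⟩
  · rintro ⟨i, h0, h1, h2⟩
    have hss : (pvRes n ns u).toFinset ⊂ Finset.Ico (0 : Int) u :=
      (Finset.ssubset_iff_of_subset hsub).2
        ⟨i, Finset.mem_Ico.2 ⟨h0, h1⟩, fun h => h2 (List.mem_toFinset.1 h)⟩
    have := Finset.card_lt_card hss
    omega

theorem pvHeart (n : Int) (ns : List Int) (u m : Int)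
    (hu : 1 ≤ u) (hm : 1 ≤ m) (hmu : m * u = n) :
    pvGood ns u m ↔ (((pvRes n ns u).length : Int) < u) := by
  unfold pvGood
  rw [pvRes_len_lt_iff n ns u hu]
  constructor
  · rintro ⟨i, h0, h1, h2⟩
    exact ⟨i, h0, h1, (notMem_pvRes_iff n ns u m i hu hm hmu h0 h1).2 h2⟩
  · rintro ⟨i, h0, h1, h2⟩
    exact ⟨i, h0, h1, (notMem_pvRes_iff n ns u m i hu hm hmu h0 h1).1 h2⟩

theorem solve_eq_true (n : Int) (ns : List Int) (hn : 1 ≤ n) :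
    solve n ns = true ↔ ∃ m : Int, 1 ≤ m ∧ m ∣ n ∧ 3 ≤ m ∧ pvGood ns (n / m) m := by
  unfold solve
  rw [List.any_eq_true]
  constructor
  · rintro ⟨m, hmem, hp⟩
    rcases (mem_pvDivSet n 1 _ m).1 hmem with hemp | hex
    · exact absurd hemp (by simp [PySem.Set.empty])
    · have hdvd := (divisor_pair_iff n m hn 1 rfl).1 hex
      by_cases hm3 : m < 3
      · rw [if_pos hm3] at hp; exact absurd hp (by simp)
      · rw [if_neg hm3] at hp
        refine ⟨m, hdvd.1, hdvd.2, by omega, ?_⟩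
        rw [← PySem.Int.floordiv_eq_ediv_of_pos (b := m) (by omega)]
        exact (pvInner_iff ns _ m).1 hp
  · rintro ⟨m, hm1, hmd, hm3, hg⟩
    refine ⟨m, ?_, ?_⟩
    · exact (mem_pvDivSet n 1 _ m).2 (Or.inr ((divisor_pair_iff n m hn 1 rfl).2 ⟨hm1, hmd⟩))
    · rw [if_neg (by omega)]
      apply (pvInner_iff ns _ m).2
      rwa [PySem.Int.floordiv_eq_ediv_of_pos (b := m) (by omega)]

theorem pvOk_eq_true (n : Int) (ns : List Int) (u : Int) (hu : 1 ≤ u) :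
    pvOk n (pvZeros n ns) u = true ↔ (3 ≤ n / u ∧ ((pvRes n ns u).length : Int) < u) := by
  unfold pvOk pvRes
  rw [PySem.Int.floordiv_eq_ediv_of_pos (by omega)]
  simp

theorem solve_alt_eq_true (n : Int) (ns : List Int) (hn : 1 ≤ n) :
    solve_alt n ns = true ↔
      ∃ u : Int, 1 ≤ u ∧ u ∣ n ∧ 3 ≤ n / u ∧ (((pvRes n ns u).length : Int) < u) := by
  show pvAltLoop n (pvZeros n ns) 1 = true ↔ _
  rw [pvAltLoop_eq_true]
  constructor
  · rintro ⟨d, hd1, hd2, hd3, hd4⟩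
    rcases hd4 with h4 | h4
    · have hdvd := (divisor_pair_iff n (d : Int) hn 1 rfl).1 ⟨d, hd1, hd2, hd3, Or.inl rfl⟩
      exact ⟨(d : Int), hdvd.1, hdvd.2, ((pvOk_eq_true n ns _ hdvd.1).1 h4).1,
        ((pvOk_eq_true n ns _ hdvd.1).1 h4).2⟩
    · have hdvd := (divisor_pair_iff n (PySem.Int.floordiv n d) hn 1 rfl).1
        ⟨d, hd1, hd2, hd3, Or.inr rfl⟩
      exact ⟨PySem.Int.floordiv n d, hdvd.1, hdvd.2, ((pvOk_eq_true n ns _ hdvd.1).1 h4).1,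
        ((pvOk_eq_true n ns _ hdvd.1).1 h4).2⟩
  · rintro ⟨u, hu1, hud, hu3, hlen⟩
    obtain ⟨d, hd1, hd2, hd3, hd4⟩ := (divisor_pair_iff n u hn 1 rfl).2 ⟨hu1, hud⟩
    refine ⟨d, hd1, hd2, hd3, ?_⟩
    rcases hd4 with h4 | h4
    · exact Or.inl (by rw [← h4]; exact (pvOk_eq_true n ns u hu1).2 ⟨hu3, hlen⟩)
    · exact Or.inr (by rw [← h4]; exact (pvOk_eq_true n ns u hu1).2 ⟨hu3, hlen⟩)

-- ===== VERDICT =====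
theorem solve_spec : Claim_equal_solve := by
  intro n ns _hdom hpre
  unfold Spec_solve
  by_cases hn : 1 ≤ n
  · rw [Bool.eq_iff_iff, solve_eq_true n ns hn, solve_alt_eq_true n ns hn]
    unfold Pre_solve at hpre
    constructor
    · rintro ⟨m, hm1, hmd, hm3, hg⟩
      obtain ⟨k, hk⟩ := hmd
      have hm0 : m ≠ 0 := by omega
      have hnm : n / m = k := by rw [hk]; exact Int.mul_ediv_cancel_left k hm0
      have hk1 : 1 ≤ k := by nlinarith
      refine ⟨k, hk1, Dvd.intro m (by linarith [hk]), ?_, ?_⟩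
      · have : n / k = m := by rw [hk, mul_comm]; exact Int.mul_ediv_cancel_left m (by omega)
        omega
      · rw [← (pvHeart n ns k m hk1 hm1 (by linarith [hk]))]
        rwa [hnm] at hg
    · rintro ⟨u, hu1, hud, hu3, hlen⟩
      obtain ⟨k, hk⟩ := hud
      have hu0 : u ≠ 0 := by omega
      have hnu : n / u = k := by rw [hk]; exact Int.mul_ediv_cancel_left k hu0
      have hk1 : 1 ≤ k := by nlinarith
      refine ⟨k, hk1, Dvd.intro u (by linarith [hk]), by omega, ?_⟩
      have hnk : n / k = u := by rw [hk, mul_comm]; exact Int.mul_ediv_cancel_left u (by omega)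
      rw [hnk]
      exact (pvHeart n ns u k hu1 hk1 (by linarith [hk])).2 hlen
  · have ha : solve n ns = false := by
      unfold solve
      rw [pvDivSet]
      simp only [Nat.cast_one, one_mul]
      rw [dif_neg (by omega)]
      rfl
    have hb : solve_alt n ns = false := by
      unfold solve_alt
      rw [pvAltLoop]
      simp only [Nat.cast_one, one_mul]
      rw [dif_neg (by omega)]
    rw [ha, hb]
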